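-- pv_equiv track=rewrite | github.com/ybezginova2016/Python_tasks | 0_miscellaneous/5_sets.py | new_set
-- ===== SOURCE A (Python) =====
-- def new_set(n):
--     D = set()
--     for i in range(1, n+1):
--         if i % 5 == 2 or i % 5 == 4:
--             if i % 7 == 3:
--                 if i % 3 != 1:
--                     D.add(i)
--     return D
-- ===== SOURCE B (Python) =====
-- def new_set(n):
--     # Residues mod 105 satisfying r%5 in {2,4}, r%7==3, r%3!=1 are exactly {17,24,59,87};
--     # walk the arithmetic progressions instead of testing every integer in [1,n].
--     D = set()
--     for base in range(0, n + 1, 105):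
--         for r in (17, 24, 59, 87):
--             v = base + r
--             if v <= n:
--                 D.add(v)
--     return D
-- ===== Notes on version B (the rewrite author's own statement) =====
-- stated objective: faster
-- what changed: B precomputes the four residues mod 105 that satisfy all three congruences and enumerates only the arithmetic progressions base+{17,24,59,87} for base in range(0,n+1,105), instead of testing every integer in 1..n.
import Mathlib
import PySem

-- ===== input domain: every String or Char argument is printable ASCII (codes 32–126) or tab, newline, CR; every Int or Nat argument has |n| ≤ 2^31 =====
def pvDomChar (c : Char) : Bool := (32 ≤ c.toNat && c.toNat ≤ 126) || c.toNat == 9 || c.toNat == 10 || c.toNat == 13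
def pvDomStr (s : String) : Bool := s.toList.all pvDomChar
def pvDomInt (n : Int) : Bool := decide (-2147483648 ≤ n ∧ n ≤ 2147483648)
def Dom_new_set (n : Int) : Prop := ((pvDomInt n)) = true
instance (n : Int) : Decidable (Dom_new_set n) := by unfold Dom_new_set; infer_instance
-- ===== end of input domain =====

-- B visits only the arithmetic progressions base+{17,24,59,87} (the residues mod 105 that pass
-- all three congruence tests) instead of testing every integer in 1..n: constant-factor faster.

-- ===== PORT A =====
def new_set (n : Int) : List Int :=
  (PySem.List.pyRange 1 (n+1) 1).foldl
    (fun D i =>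
      if PySem.Int.mod i 5 == 2 || PySem.Int.mod i 5 == 4 then
        if PySem.Int.mod i 7 == 3 then
          if PySem.Int.mod i 3 != 1 then PySem.Set.add D i else D
        else D
      else D) []

-- ===== PORT B =====
def new_set_alt (n : Int) : List Int :=
  (PySem.List.pyRange 0 (n+1) 105).foldl
    (fun D base =>
      ([17, 24, 59, 87] : List Int).foldl
        (fun D r => if base + r ≤ n then PySem.Set.add D (base + r) else D) D) []

-- ===== PRECONDITION & SPEC =====
def Spec_new_set (n : Int) (out : List Int) : Prop := out = new_set_alt n
instance (n : Int) (out : List Int) : Decidable (Spec_new_set n out) := by unfold Spec_new_set; infer_instance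

-- ===== CLAIM (what is proved, stated in full; the proofs are below) =====
def Claim_equal_new_set : Prop := ∀ (n : Int), Dom_new_set n → Spec_new_set n (new_set n)

-- ===== LEMMAS AND PROOFS =====

/-- The common predicate: `i` belongs to the result iff `i % 105 ∈ {17,24,59,87}`. -/
def condB (i : Int) : Bool := (i % 105 == 17) || (i % 105 == 24) || (i % 105 == 59) || (i % 105 == 87)

theorem pvSet_add_of_not_mem (D : List Int) (x : Int) (h : x ∉ D) :
    PySem.Set.add D x = D ++ [x] := by
  simp [PySem.Set.add, PySem.Set.contains, h]

theorem pvFoldl_addIf (p : Int → Bool) :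
    ∀ (xs D : List Int), xs.Nodup → (∀ x ∈ xs, x ∉ D) →
      xs.foldl (fun D i => if p i then PySem.Set.add D i else D) D = D ++ xs.filter p := by
  intro xs
  induction xs with
  | nil => intro D _ _; simp
  | cons x xs ih =>
    intro D hnd hfr
    rcases List.nodup_cons.mp hnd with ⟨hx, hnd'⟩
    by_cases hp : p x
    · rw [List.foldl_cons, if_pos hp, pvSet_add_of_not_mem D x (hfr x (by simp)),
        ih (D ++ [x]) hnd' ?_]
      · simp [List.filter_cons, hp]
      · intro y hy
        simp only [List.mem_append, List.mem_singleton]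
        push_neg
        exact ⟨hfr y (by simp [hy]), fun he => hx (he ▸ hy)⟩
    · rw [List.foldl_cons, if_neg hp, ih D hnd' (fun y hy => hfr y (by simp [hy]))]
      simp [List.filter_cons, hp]

theorem pvStepA_eq (D : List Int) (i : Int) :
    (if PySem.Int.mod i 5 == 2 || PySem.Int.mod i 5 == 4 then
        if PySem.Int.mod i 7 == 3 then
          if PySem.Int.mod i 3 != 1 then PySem.Set.add D i else D
        else D
      else D)
    = if condB i then PySem.Set.add D i else D := by
  have h5 : PySem.Int.mod i 5 = i % 5 := PySem.Int.mod_eq_emod_of_pos (by norm_num)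
  have h7 : PySem.Int.mod i 7 = i % 7 := PySem.Int.mod_eq_emod_of_pos (by norm_num)
  have h3 : PySem.Int.mod i 3 = i % 3 := PySem.Int.mod_eq_emod_of_pos (by norm_num)
  simp only [h5, h7, h3, condB, bne_iff_ne, ne_eq, Bool.or_eq_true, beq_iff_eq]
  split_ifs <;> first | rfl | (exfalso; omega)

theorem pvLA (n : Int) : new_set n = (PySem.List.pyRange 1 (n+1) 1).filter condB := by
  unfold new_set
  rw [PySem.List.foldl_congr_mem _ _
      (fun D i => if condB i then PySem.Set.add D i else D) _
      (fun D i _ => pvStepA_eq D i)]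
  simpa using pvFoldl_addIf condB (PySem.List.pyRange 1 (n+1) 1) []
    (PySem.List.nodup_pyRange_one 1 (n+1)) (by simp)

theorem pvInnerGen (n base : Int) :
    ∀ (rs D : List Int), rs.Pairwise (· < ·) → (∀ r ∈ rs, ∀ x ∈ D, x < base + r) →
      rs.foldl (fun D r => if base + r ≤ n then PySem.Set.add D (base + r) else D) D
        = D ++ (rs.map (fun r => base + r)).filter (fun v => v ≤ n) := by
  intro rs
  induction rs with
  | nil => intro D _ _; simp
  | cons r rs ih =>
    intro D hpw hfr
    rcases List.pairwise_cons.mp hpw with ⟨hlt, hpw'⟩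
    by_cases hle : base + r ≤ n
    · rw [List.foldl_cons, if_pos hle,
        pvSet_add_of_not_mem D (base + r) (fun hm => lt_irrefl _ (hfr r (by simp) _ hm)),
        ih (D ++ [base + r]) hpw' ?_]
      · simp [List.filter_cons, hle]
      · intro r' hr' x hx
        rcases List.mem_append.mp hx with hx | hx
        · exact hfr r' (by simp [hr']) x hx
        · simp only [List.mem_singleton] at hx
          subst hx; exact by have := hlt r' hr'; omega
    · rw [List.foldl_cons, if_neg hle, ih D hpw' (fun r' hr' => hfr r' (by simp [hr']))]
      simp [List.filter_cons, hle]

theorem pvRange105_nil (a b : Int) (h : b ≤ a) : PySem.List.pyRange a b 105 = [] := by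
  rw [PySem.List.pyRange_of_pos _ _ (by norm_num : (0:Int) < 105), if_neg (by omega)]
  simp

theorem pvRange105_cons (a b : Int) (h : a < b) :
    PySem.List.pyRange a b 105 = a :: PySem.List.pyRange (a+105) b 105 := by
  rw [PySem.List.pyRange_of_pos _ _ (by norm_num : (0:Int) < 105),
      PySem.List.pyRange_of_pos _ _ (by norm_num : (0:Int) < 105), if_pos h]
  have ht : ((b - a + 105 - 1) / 105).toNat
      = ((if a+105 < b then ((b - (a+105) + 105 - 1) / 105).toNat else 0)) + 1 := by
    split_ifs with h2 <;> omega
  rw [ht, List.range_succ_eq_map]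
  simp only [List.map_cons, List.map_map, Nat.cast_zero, mul_zero, add_zero, List.cons.injEq]
  refine ⟨by norm_num, List.map_congr_left fun k _ => ?_⟩
  simp only [Function.comp_apply, Nat.succ_eq_add_one]
  push_cast; ring

theorem pvK0 : ∀ t : Nat, t ≤ 105 →
    List.map (fun k : Nat => (k:Int) + 1)
        (List.filter (fun k : Nat => condB ((k:Int)+1)) (List.range t))
      = ([17,24,59,87] : List Int).filter (fun r => r ≤ (t:Int)) := by decide

theorem pvCondShift (base j : Int) (hb : base % 105 = 0) : condB (base + j) = condB j := by
  have : (base + j) % 105 = j % 105 := by omega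
  simp [condB, this]

theorem pvK (base m : Int) (hb : base % 105 = 0) (h1 : base ≤ m) (h2 : m ≤ base + 105) :
    (PySem.List.pyRange (base+1) (m+1) 1).filter condB
      = ([base+17, base+24, base+59, base+87] : List Int).filter (fun v => v ≤ m) := by
  have htI : ((m + 1 - (base + 1)).toNat : Int) = m - base := by omega
  have htle : (m + 1 - (base + 1)).toNat ≤ 105 := by omega
  rw [PySem.List.pyRange_one, List.filter_map]
  have hmap : (fun k : Nat => base + 1 + (k:Int)) = (fun x : Int => base + x) ∘ (fun k : Nat => (k:Int) + 1) := by
    funext k; simp [Function.comp]; ring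
  have hcond : ∀ k ∈ List.range (m + 1 - (base + 1)).toNat,
      (condB ∘ fun k : Nat => base + 1 + (k:Int)) k = condB ((k:Int)+1) := by
    intro k _
    simp only [Function.comp]
    rw [show base + 1 + (k:Int) = base + ((k:Int)+1) by ring, pvCondShift _ _ hb]
  have hK := pvK0 _ htle
  rw [htI] at hK
  rw [List.filter_congr hcond, hmap, ← List.map_map, hK,
    show ([base+17, base+24, base+59, base+87] : List Int)
        = List.map (fun r => base + r) [17,24,59,87] from by simp,
    List.filter_map]
  refine congrArg _ (List.filter_congr fun r hr => ?_)
  simp only [Function.comp, decide_eq_decide]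
  omega

theorem pvG (n : Int) : ∀ (fuel : Nat), ∀ (base : Int) (D : List Int),
    (n + 1 - base).toNat ≤ fuel → 0 ≤ base → base % 105 = 0 → (∀ x ∈ D, x ≤ base) →
    (PySem.List.pyRange base (n+1) 105).foldl
      (fun D b => ([17, 24, 59, 87] : List Int).foldl
        (fun D r => if b + r ≤ n then PySem.Set.add D (b + r) else D) D) D
      = D ++ (PySem.List.pyRange (base+1) (n+1) 1).filter condB := by
  intro fuel
  induction fuel with
  | zero =>
    intro base D hf _ _ _
    rw [pvRange105_nil _ _ (by omega), PySem.List.pyRange_one_eq_nil (by omega)]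
    simp
  | succ fuel ih =>
    intro base D hf h0 hmod hD
    by_cases hle : n + 1 ≤ base
    · rw [pvRange105_nil _ _ (by omega), PySem.List.pyRange_one_eq_nil (by omega)]
      simp
    · rw [pvRange105_cons _ _ (by omega), List.foldl_cons,
        pvInnerGen n base [17, 24, 59, 87] D (by decide) ?fr1,
        ih (base+105) _ (by omega) (by omega) (by omega) ?fr2]
      case fr1 =>
        intro r hr x hx
        have := hD x hx
        simp only [List.mem_cons, List.not_mem_nil, or_false] at hr
        rcases hr with h|h|h|h <;> omega
      case fr2 =>
        intro x hx
        rcases List.mem_append.mp hx with hx | hx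
        · have := hD x hx; omega
        · have hx' := (List.mem_filter.mp hx).1
          simp only [List.map_cons, List.map_nil, List.mem_cons, List.not_mem_nil,
            or_false] at hx'
          rcases hx' with h|h|h|h <;> omega
      rw [show base + 105 + 1 = base + 106 from by ring, List.append_assoc]
      congr 1
      by_cases hfull : base + 105 ≤ n
      · rw [PySem.List.pyRange_one_append (base+1) (base+106) (n+1) (by omega) (by omega),
          List.filter_append]
        congr 1
        · have hK := pvK base (base+105) hmod (by omega) (by omega)
          rw [show base + 105 + 1 = base + 106 by ring] at hK
          rw [hK]
          simp only [List.map_cons, List.map_nil]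
          rw [List.filter_eq_self.mpr ?g1, List.filter_eq_self.mpr ?g2]
          case g1 =>
            intro a ha
            simp only [List.mem_cons, List.not_mem_nil, or_false] at ha
            rcases ha with h|h|h|h <;> subst h <;> simp only [decide_eq_true_eq] <;> omega
          case g2 =>
            intro a ha
            simp only [List.mem_cons, List.not_mem_nil, or_false] at ha
            rcases ha with h|h|h|h <;> subst h <;> simp only [decide_eq_true_eq] <;> omega
      · rw [PySem.List.pyRange_one_eq_nil (show n+1 ≤ base+106 by omega)]
        rw [pvK base n hmod (by omega) (by omega)]
        simp only [List.map_cons, List.map_nil, List.filter_nil, List.append_nil]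

theorem pvLB (n : Int) : new_set_alt n = (PySem.List.pyRange 1 (n+1) 1).filter condB := by
  unfold new_set_alt
  have h := pvG n (n+1).toNat 0 [] (by omega) (by omega) (by omega) (by simp)
  simpa using h

-- ===== VERDICT (by name: the statement is the Claim_ definition above) =====
theorem new_set_spec : Claim_equal_new_set := by
  intro n _
  unfold Spec_new_set
  rw [pvLA, pvLB]
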